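-- pv_equiv track=rewrite | github.com/gtcooke94/random_snippets | morsels/20191007_tags_equal/tags_equal.py | handle_spaces
-- ===== SOURCE A (Python) =====
-- def handle_spaces(elements, quote_chars):
--     i = 0
--     fixed_elements = []
--     char_replaced = False
--     for i, element in enumerate(elements):
--         new_element = element
--         if char_replaced:
--             char_replaced = False
--             continue
--         for char in quote_chars:
--             if char in elements[i]:
--                 if i + 1 >= len(elements):
--                     continue
--                 if not char in elements[i + 1]:
--                     continue
--                 char_replaced = True
--                 # We've split on a space
--                 new_element = element + " " + elements[i + 1]
--                 new_element = new_element.replace(char, "")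
--         fixed_elements.append(new_element)
--     return fixed_elements
-- ===== SOURCE B (Python) =====
-- def last_shared(x, y, quote_chars):
--     m = None
--     for ch in quote_chars:
--         if ch in x and ch in y:
--             m = ch
--     return m
--
--
-- def handle_spaces(elements, quote_chars):
--     n = len(elements)
--     # stage 1: precompute, for each adjacent pair, the last quote char shared by both
--     pair = [last_shared(elements[i], elements[i + 1], quote_chars)
--             for i in range(n - 1)] + [None]
--     # stage 2: greedily pick the block start indices (a block is 1 or 2 elements)
--     starts = []
--     i = 0
--     while i < n:
--         starts.append(i)
--         i += 1 if pair[i] is None else 2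
--     # stage 3: render each block
--     return [elements[i] if pair[i] is None
--             else (elements[i] + " " + elements[i + 1]).replace(pair[i], "")
--             for i in starts]
-- ===== Notes on version B (the rewrite author's own statement) =====
-- stated objective: alternative
-- what changed: Replaces A's single online pass with skip-flag state by three staged passes: first precompute a table of the last quote char shared by each adjacent pair, then greedily select block-start indices from that table, then render each block from the table.
import Mathlib
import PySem

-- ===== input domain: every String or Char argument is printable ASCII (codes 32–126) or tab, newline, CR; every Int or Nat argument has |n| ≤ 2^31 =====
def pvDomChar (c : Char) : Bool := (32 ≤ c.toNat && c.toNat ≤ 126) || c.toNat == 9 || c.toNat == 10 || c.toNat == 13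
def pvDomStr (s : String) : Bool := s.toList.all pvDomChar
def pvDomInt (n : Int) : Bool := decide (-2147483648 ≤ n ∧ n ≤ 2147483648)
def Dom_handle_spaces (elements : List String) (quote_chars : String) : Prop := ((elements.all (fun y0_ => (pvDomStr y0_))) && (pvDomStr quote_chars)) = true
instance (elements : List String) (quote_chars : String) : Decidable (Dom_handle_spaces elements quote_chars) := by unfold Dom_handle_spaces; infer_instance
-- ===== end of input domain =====

-- B replaces A's single online pass with skip-flag state by three staged passes (precomputed
-- pair-match table, greedy block-start selection, block rendering); objective: alternative.

-- ===== PORT A =====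
-- inner `for char in quote_chars` body; state (new_element, char_replaced)
def pvInnerA (elements : List String) (i : Int) (element : String) (st2 : String × Bool) (ch : Char) : String × Bool :=
  if PySem.Str.isIn (String.ofList [ch]) element then
    if i + 1 ≥ (elements.length : Int) then st2
    else if ¬ PySem.Str.isIn (String.ofList [ch]) (PySem.List.pyGetD elements (i + 1) "") then st2
    -- elements[i+1] is bound-checked above, so pyGetD with default "" is exact
    else (PySem.Str.replace (element ++ " " ++ PySem.List.pyGetD elements (i + 1) "") (String.ofList [ch]) "", true)
  else st2

-- outer `for i, element in enumerate(elements)` body; state (fixed_elements, char_replaced)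
def pvStepA (elements : List String) (qcs : List Char) (st : List String × Bool) (ie : Int × String) : List String × Bool :=
  if st.2 then (st.1, false)
  else
    let inner := qcs.foldl (pvInnerA elements ie.1 ie.2) (ie.2, false)
    (st.1 ++ [inner.1], inner.2)

def handle_spaces (elements : List String) (quote_chars : String) : List String :=
  ((PySem.List.enumerate elements 0).foldl (pvStepA elements quote_chars.toList) ([], false)).1

-- ===== PORT B =====
-- Source B's last_shared: the last char of quote_chars occurring in both x and y (None if no such char)
def pvLastShared (x y : String) (quote_chars : String) : Option Char :=
  quote_chars.toList.foldl (fun m ch =>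
    if PySem.Str.isIn (String.ofList [ch]) x && PySem.Str.isIn (String.ofList [ch]) y then some ch else m) none

-- stage 1: the comprehension `[last_shared(elements[i], elements[i+1], qcs) for i in range(n-1)] + [None]`
-- (indices 0..n-2 and their +1 are in range, so pyGetD with default "" is exact)
def pvPair (elements : List String) (quote_chars : String) : List (Option Char) :=
  ((PySem.List.pyRange 0 ((elements.length : Int) - 1) 1).map
    (fun i => pvLastShared (PySem.List.pyGetD elements i "") (PySem.List.pyGetD elements (i + 1) "") quote_chars)) ++ [none]

-- stage 2: the `while i < n` loop collecting block-start indices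
-- (i < n ≤ pair.length on every iteration, so getD with default none is exact)
def pvStarts (pair : List (Option Char)) (n : Nat) (i : Nat) : List Nat :=
  if _h : i < n then
    i :: pvStarts pair n (i + if (pair.getD i none).isSome then 2 else 1)
  else []
  termination_by n - i
  decreasing_by split <;> omega

-- stage 3: the rendering comprehension over starts
def handle_spaces_alt (elements : List String) (quote_chars : String) : List String :=
  let n := elements.length
  let pair := pvPair elements quote_chars
  (pvStarts pair n 0).map (fun i =>
    match pair.getD i none with
    | none => PySem.List.pyGetD elements (i : Int) ""
    | some ch => PySem.Str.replace
        (PySem.List.pyGetD elements (i : Int) "" ++ " " ++ PySem.List.pyGetD elements ((i : Int) + 1) "")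
        (String.ofList [ch]) "")

-- ===== PRECONDITION & SPEC =====
def Spec_handle_spaces (elements : List String) (quote_chars : String) (out : List String) : Prop := out = handle_spaces_alt elements quote_chars
instance (elements : List String) (quote_chars : String) (out : List String) : Decidable (Spec_handle_spaces elements quote_chars out) := by unfold Spec_handle_spaces; infer_instance

-- ===== CLAIM (what is proved, stated in full; the proofs are below) =====
def Claim_equal_handle_spaces : Prop := ∀ (elements : List String) (quote_chars : String), Dom_handle_spaces elements quote_chars → Spec_handle_spaces elements quote_chars (handle_spaces elements quote_chars)

-- ===== LEMMAS AND PROOFS =====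

-- intermediate specification both ports are reduced to: consume one element, or a merged pair
def pvLastMatch (qcs : List Char) (x y : String) : Option Char :=
  qcs.foldl (fun acc ch =>
    if PySem.Str.isIn (String.ofList [ch]) x && PySem.Str.isIn (String.ofList [ch]) y then some ch else acc) none

def pvAltGo (qcs : List Char) : List String → List String
  | [] => []
  | [x] => [x]
  | x :: y :: rest =>
      match pvLastMatch qcs x y with
      | none => x :: pvAltGo qcs (y :: rest)
      | some ch => PySem.Str.replace (x ++ " " ++ y) (String.ofList [ch]) "" :: pvAltGo qcs rest

theorem lastShared_eq (x y : String) (qcs : String) :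
    pvLastShared x y qcs = pvLastMatch qcs.toList x y := rfl

-- A's inner char loop when i+1 is out of range: nothing ever matches
theorem innerA_oob (elements : List String) (i : Int) (x : String)
    (h : ¬ (i + 1 < (elements.length : Int))) (qcs : List Char) (st2 : String × Bool) :
    qcs.foldl (pvInnerA elements i x) st2 = st2 := by
  induction qcs generalizing st2 with
  | nil => rfl
  | cons ch t ih =>
      have : pvInnerA elements i x st2 ch = st2 := by
        unfold pvInnerA
        split_ifs with h1 h2 h3 <;> first | rfl | omega
      simp [List.foldl_cons, this, ih]

-- A's inner char loop when elements[i+1] = y exists: it computes pvLastMatch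
theorem innerA_inb (elements : List String) (i : Int) (x y : String)
    (hlt : i + 1 < (elements.length : Int)) (hy : PySem.List.pyGetD elements (i + 1) "" = y)
    (qcs : List Char) (ne : String) (cr : Bool) :
    qcs.foldl (pvInnerA elements i x) (ne, cr) =
      match pvLastMatch qcs x y with
      | none => (ne, cr)
      | some ch => (PySem.Str.replace (x ++ " " ++ y) (String.ofList [ch]) "", true) := by
  induction qcs using List.reverseRecOn generalizing ne cr with
  | nil => rfl
  | append_singleton t ch ih =>
      rw [List.foldl_append, List.foldl_cons, List.foldl_nil]
      unfold pvLastMatch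
      rw [List.foldl_append, List.foldl_cons, List.foldl_nil]
      have hge : ¬ (i + 1 ≥ (elements.length : Int)) := by omega
      rw [ih]
      by_cases hx : PySem.Str.isIn (String.ofList [ch]) x = true <;>
        by_cases hyc : PySem.Str.isIn (String.ofList [ch]) y = true <;>
          rcases hpm : pvLastMatch t x y with _ | c <;>
            simp_all [pvInnerA, pvLastMatch]

-- A's main loop invariant: from position k with flag down, A appends exactly pvAltGo of the suffix
theorem mainA (els : List String) (qcs : List Char) :
    ∀ m k acc, els.length - k = m →
    (PySem.List.enumerate (els.drop k) (k : Int)).foldl (pvStepA els qcs) (acc, false) =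
      (acc ++ pvAltGo qcs (els.drop k), false) := by
  intro m
  induction m using Nat.strong_induction_on with
  | _ m ih =>
    intro k acc hm
    by_cases hk : k < els.length
    · have hdk : els.drop k = els[k] :: els.drop (k + 1) := List.drop_eq_getElem_cons hk
      by_cases hk1 : k + 1 < els.length
      · -- a next element exists
        have hdk1 : els.drop (k + 1) = els[k+1] :: els.drop (k + 2) := List.drop_eq_getElem_cons hk1
        have hy : PySem.List.pyGetD els ((k : Int) + 1) "" = els[k+1] := by
          have : ((k : Int) + 1) = ((k + 1 : Nat) : Int) := by push_cast; ring
          rw [this, PySem.List.pyGetD_natCast]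
          simp [List.getD, hk1]
        have hlt : (k : Int) + 1 < (els.length : Int) := by exact_mod_cast hk1
        rw [hdk, PySem.List.enumerate_cons, List.foldl_cons]
        have hstep : pvStepA els qcs (acc, false) ((k : Int), els[k]) =
            (acc ++ [(qcs.foldl (pvInnerA els (k : Int) els[k]) (els[k], false)).1],
             (qcs.foldl (pvInnerA els (k : Int) els[k]) (els[k], false)).2) := by
          simp [pvStepA]
        rw [hstep, innerA_inb els (k : Int) els[k] els[k+1] hlt hy]
        rcases hlm : pvLastMatch qcs els[k] els[k+1] with _ | ch
        · -- no merge: consume one element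
          simp only
          have : ((k : Int) + 1) = (((k + 1 : Nat) : Int)) := by push_cast; ring
          rw [this, ih (m - 1) (by omega) (k + 1) (acc ++ [els[k]]) (by omega)]
          rw [hdk1]
          simp [pvAltGo, hlm]
        · -- merge: next iteration resets the flag, consume two elements
          simp only
          rw [hdk1, PySem.List.enumerate_cons, List.foldl_cons]
          have hskip : ∀ (a : List String) (ie : Int × String), pvStepA els qcs (a, true) ie = (a, false) := by
            intro a ie; simp [pvStepA]
          rw [hskip]
          have : ((k : Int) + 1 + 1) = (((k + 2 : Nat) : Int)) := by push_cast; ring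
          rw [this, ih (m - 2) (by omega) (k + 2) _ (by omega)]
          simp [pvAltGo, hlm]
      · -- last element: no merge possible
        have hd1 : els.drop (k + 1) = [] := by
          apply List.drop_eq_nil_of_le; omega
        have hnil : els.drop k = [els[k]] := by rw [hdk, hd1]
        have hoob : ¬ ((k : Int) + 1 < (els.length : Int)) := by
          intro h; exact hk1 (by exact_mod_cast h)
        rw [hnil]
        simp only [PySem.List.enumerate_cons, PySem.List.enumerate_nil, List.foldl_cons, List.foldl_nil]
        have : pvStepA els qcs (acc, false) ((k : Int), els[k]) = (acc ++ [els[k]], false) := by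
          simp [pvStepA, innerA_oob els (k : Int) els[k] hoob]
        rw [this, pvAltGo]
    · have : els.drop k = [] := by apply List.drop_eq_nil_of_le; omega
      rw [this]
      simp [PySem.List.enumerate_nil, pvAltGo]

-- B's pair table at an index with a successor: it holds pvLastMatch of the adjacent pair
theorem pair_getD_inb (els : List String) (qcs : String) (k : Nat) (hk1 : k + 1 < els.length) :
    (pvPair els qcs).getD k none = pvLastMatch qcs.toList els[k] els[k+1] := by
  unfold pvPair
  have hlen : ((PySem.List.pyRange 0 ((els.length : Int) - 1) 1).map
      (fun i => pvLastShared (PySem.List.pyGetD els i "") (PySem.List.pyGetD els (i + 1) "") qcs)).length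
      = els.length - 1 := by
    simp [PySem.List.length_pyRange_one]
  have hk : k < els.length - 1 := by omega
  rw [List.getD_eq_getElem _ _ (by simp [hlen]; omega), List.getElem_append_left (by omega)]
  simp only [List.getElem_map, PySem.List.getElem_pyRange_one]
  simp only [zero_add]
  have h1 : ((k : Int) + 1) = (((k + 1 : Nat)) : Int) := by push_cast; ring
  rw [h1, PySem.List.pyGetD_natCast, PySem.List.pyGetD_natCast, lastShared_eq]
  have hka : k < els.length := by omega
  congr 1 <;> simp [List.getD, hk1, hka]

-- B's pair table at the last index: the appended None
theorem pair_getD_last (els : List String) (qcs : String) (k : Nat)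
    (hk : k < els.length) (hk1 : ¬ (k + 1 < els.length)) :
    (pvPair els qcs).getD k none = none := by
  unfold pvPair
  have hlen : ((PySem.List.pyRange 0 ((els.length : Int) - 1) 1).map
      (fun i => pvLastShared (PySem.List.pyGetD els i "") (PySem.List.pyGetD els (i + 1) "") qcs)).length
      = els.length - 1 := by
    simp [PySem.List.length_pyRange_one]
  have hke : k = els.length - 1 := by omega
  rw [List.getD_eq_getElem _ _ (by simp [hlen]; omega)]
  rw [List.getElem_append_right (by omega)]
  simp [hlen, hke]

-- B's stage-2+3 pipeline from position k equals pvAltGo of the suffix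
theorem mainB (els : List String) (qcs : String) :
    ∀ m k, els.length - k = m →
    (pvStarts (pvPair els qcs) els.length k).map (fun i =>
      match (pvPair els qcs).getD i none with
      | none => PySem.List.pyGetD els (i : Int) ""
      | some ch => PySem.Str.replace
          (PySem.List.pyGetD els (i : Int) "" ++ " " ++ PySem.List.pyGetD els ((i : Int) + 1) "")
          (String.ofList [ch]) "") = pvAltGo qcs.toList (els.drop k) := by
  intro m
  induction m using Nat.strong_induction_on with
  | _ m ih =>
    intro k hm
    by_cases hk : k < els.length
    · have hdk : els.drop k = els[k] :: els.drop (k + 1) := List.drop_eq_getElem_cons hk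
      have hgk : PySem.List.pyGetD els ((k : Nat) : Int) "" = els[k] := by
        rw [PySem.List.pyGetD_natCast]; simp [List.getD, hk]
      by_cases hk1 : k + 1 < els.length
      · have hdk1 : els.drop (k + 1) = els[k+1] :: els.drop (k + 2) := List.drop_eq_getElem_cons hk1
        have hgk1 : PySem.List.pyGetD els (((k : Nat) : Int) + 1) "" = els[k+1] := by
          have : ((k : Int) + 1) = ((k + 1 : Nat) : Int) := by push_cast; ring
          rw [this, PySem.List.pyGetD_natCast]; simp [List.getD, hk1]
        have hpair := pair_getD_inb els qcs k hk1
        rw [pvStarts]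
        rcases hlm : pvLastMatch qcs.toList els[k] els[k+1] with _ | ch
        · simp only [hk, dif_pos, hpair, hlm, Option.isSome_none, Bool.false_eq_true, if_false, List.map_cons]
          rw [ih (m - 1) (by omega) (k + 1) (by omega), hgk, hdk, hdk1]
          simp [pvAltGo, hlm]
        · simp only [hk, dif_pos, hpair, hlm, Option.isSome_some, if_pos, List.map_cons]
          rw [ih (m - 2) (by omega) (k + 2) (by omega), hgk, hgk1, hdk, hdk1]
          simp [pvAltGo, hlm]
      · have hpair := pair_getD_last els qcs k hk hk1
        rw [pvStarts]
        simp only [hk, dif_pos, hpair, Option.isSome_none, Bool.false_eq_true, if_false, List.map_cons]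
        rw [ih (m - 1) (by omega) (k + 1) (by omega), hgk]
        have hd1 : els.drop (k + 1) = [] := by apply List.drop_eq_nil_of_le; omega
        rw [hdk, hd1]
        simp [pvAltGo]
    · rw [pvStarts]
      have hd : els.drop k = [] := by apply List.drop_eq_nil_of_le; omega
      simp [hk, hd, pvAltGo]

-- ===== VERDICT (by name: the statement is the Claim_ definition above) =====
theorem handle_spaces_spec : Claim_equal_handle_spaces := by
  intro elements quote_chars _
  unfold Spec_handle_spaces handle_spaces handle_spaces_alt
  have hA := mainA elements quote_chars.toList elements.length 0 [] (by omega)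
  simp only [List.drop_zero, Nat.cast_zero] at hA
  rw [hA]
  have hB := mainB elements quote_chars elements.length 0 (by omega)
  simp only [List.drop_zero] at hB
  simp only []
  rw [hB]
  simp
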